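-- pv_equiv track=rewrite | github.com/hyunjun/practice | python/problem-string/string_without_aaa_or_bbb.py | strWithout3a3b0
-- ===== SOURCE A (Python) =====
-- def strWithout3a3b0(A, B):
--
--     def getNAndNextNum(num):
--         n = 2 if 2 < num else num
--         num = num - 2 if 2 < num else 0
--         return n, num
--
--     a, b, flag, ret = A, B, False if A < B else True, []
--     while 0 < a and 0 < b:
--         if flag:
--             n, a = getNAndNextNum(a)
--             ret.append('a' * n)
--         else:
--             n, b = getNAndNextNum(b)
--             ret.append('b' * n)
--         flag = not flag
--     while 0 < a:
--         n, a = getNAndNextNum(a)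
--         ret.append('a' * n)
--     while 0 < b:
--         n, b = getNAndNextNum(b)
--         ret.append('b' * n)
--     return ''.join(ret)
-- ===== SOURCE B (Python) =====
-- def strWithout3a3b0(A, B):
--     a, b = A, B
--     out = []
--     last = ''
--     run = 0
--     while a > 0 or b > 0:
--         if last == '':
--             c = 'a' if b <= a else 'b'
--         elif last == 'a':
--             c = 'a' if (run < 2 and a > 0) or b <= 0 else 'b'
--         else:
--             c = 'b' if (run < 2 and b > 0) or a <= 0 else 'a'
--         out.append(c)
--         run = run + 1 if c == last else 1
--         last = c
--         if c == 'a':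
--             a -= 1
--         else:
--             b -= 1
--     return ''.join(out)
-- ===== Notes on version B (the rewrite author's own statement) =====
-- stated objective: alternative
-- what changed: B is a single per-character state machine that tracks only the last letter and its current run length and emits one letter per iteration (repeat the last letter while the run is below 2 and its count remains, otherwise switch, forced repeat when the other letter is exhausted), replacing A's three while-loops that build and concatenate chunk strings of size min(2,count).
import Mathlib
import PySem

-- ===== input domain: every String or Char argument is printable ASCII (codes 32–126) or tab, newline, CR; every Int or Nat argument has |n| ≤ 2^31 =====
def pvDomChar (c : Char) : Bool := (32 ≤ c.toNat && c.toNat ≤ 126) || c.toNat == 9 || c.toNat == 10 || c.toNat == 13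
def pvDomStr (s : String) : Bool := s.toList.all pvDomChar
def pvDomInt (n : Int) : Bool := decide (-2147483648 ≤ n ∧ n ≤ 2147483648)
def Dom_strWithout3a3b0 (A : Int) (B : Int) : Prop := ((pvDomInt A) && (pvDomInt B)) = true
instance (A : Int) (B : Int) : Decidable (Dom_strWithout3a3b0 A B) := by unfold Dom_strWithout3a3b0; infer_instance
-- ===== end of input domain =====

-- B replaces A's three chunk-building while-loops by a single per-character state machine
-- (last letter + current run length, one letter emitted per iteration); same cost, different algorithm.

-- ===== PORT A =====
-- getNAndNextNum(num)
def getNAndNextNum (num : Int) : Int × Int :=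
  ((if 2 < num then 2 else num), (if 2 < num then num - 2 else 0))

-- while 0 < a and 0 < b: … (returns the final a, b and ret)
def loopBothA (flag : Bool) (a b : Int) (ret : List String) : Int × Int × List String :=
  if 0 < a ∧ 0 < b then
    if flag then
      loopBothA false (getNAndNextNum a).2 b
        (ret ++ [String.ofList (List.replicate (getNAndNextNum a).1.toNat 'a')])
    else
      loopBothA true a (getNAndNextNum b).2
        (ret ++ [String.ofList (List.replicate (getNAndNextNum b).1.toNat 'b')])
  else (a, b, ret)
termination_by a.toNat + b.toNat
decreasing_by
  · simp only [getNAndNextNum]; split <;> omega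
  · simp only [getNAndNextNum]; split <;> omega

-- while 0 < x: n, x = getNAndNextNum(x); ret.append(ch * n)
def dumpA (ch : Char) (x : Int) (ret : List String) : List String :=
  if 0 < x then
    dumpA ch (getNAndNextNum x).2 (ret ++ [String.ofList (List.replicate (getNAndNextNum x).1.toNat ch)])
  else ret
termination_by x.toNat
decreasing_by simp only [getNAndNextNum]; split <;> omega

def strWithout3a3b0 (A : Int) (B : Int) : String :=
  let flag : Bool := if A < B then false else true
  let r := loopBothA flag A B []
  let ret := dumpA 'a' r.1 r.2.2
  let ret := dumpA 'b' r.2.1 ret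
  String.join ret

-- ===== PORT B =====
-- the choice of the next character (the if/elif/else chain of Source B's loop body)
def chooseC (last : String) (run a b : Int) : String :=
  if last = "" then (if b ≤ a then "a" else "b")
  else if last = "a" then (if (run < 2 ∧ 0 < a) ∨ b ≤ 0 then "a" else "b")
  else (if (run < 2 ∧ 0 < b) ∨ a ≤ 0 then "b" else "a")

-- a decrease lemma the port's termination proof cites by name
lemma chooseC_dec (last : String) (run a b : Int) (h : 0 < a ∨ 0 < b) :
    (if chooseC last run a b = "a" then a - 1 else a).toNat
      + (if chooseC last run a b = "a" then b else b - 1).toNat < a.toNat + b.toNat := by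
  unfold chooseC
  split_ifs <;> simp_all <;> omega

-- while a > 0 or b > 0: … of Source B
def bLoopB (a b : Int) (out : List String) (last : String) (run : Int) : List String :=
  if h : 0 < a ∨ 0 < b then
    let c := chooseC last run a b
    bLoopB (if c = "a" then a - 1 else a) (if c = "a" then b else b - 1)
      (out ++ [c]) c (if c = last then run + 1 else 1)
  else out
termination_by a.toNat + b.toNat
decreasing_by exact chooseC_dec last run a b h

def strWithout3a3b0_alt (A : Int) (B : Int) : String :=
  String.join (bLoopB A B [] "" 0)

-- ===== PRECONDITION & SPEC =====
def Spec_strWithout3a3b0 (A : Int) (B : Int) (out : String) : Prop := out = strWithout3a3b0_alt A B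
instance (A : Int) (B : Int) (out : String) : Decidable (Spec_strWithout3a3b0 A B out) := by unfold Spec_strWithout3a3b0; infer_instance

-- ===== CLAIM (what is proved, stated in full; the proofs are below) =====
def Claim_equal_strWithout3a3b0 : Prop := ∀ (A : Int) (B : Int), Dom_strWithout3a3b0 A B → Spec_strWithout3a3b0 A B (strWithout3a3b0 A B)

-- ===== LEMMAS AND PROOFS =====

-- the common specification: the joined result, chunk by chunk
def csSpec (flag : Bool) (a b : Int) : String :=
  if 0 < a ∧ 0 < b then
    if flag then
      String.ofList (List.replicate (min 2 a).toNat 'a') ++ csSpec false (a - min 2 a) b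
    else
      String.ofList (List.replicate (min 2 b).toNat 'b') ++ csSpec true a (b - min 2 b)
  else
    String.ofList (List.replicate a.toNat 'a') ++ String.ofList (List.replicate b.toNat 'b')
termination_by a.toNat + b.toNat
decreasing_by all_goals omega

lemma join_snoc (xs : List String) (s : String) :
    String.join (xs ++ [s]) = String.join xs ++ s := by
  simp [String.join, List.foldl_append]

lemma join_nil : String.join [] = "" := rfl

lemma aStr : ("a" : String) = String.ofList ['a'] := by decide
lemma bStr : ("b" : String) = String.ofList ['b'] := by decide

lemma dumpA_join (ch : Char) (x : Int) (ret : List String) :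
    String.join (dumpA ch x ret)
      = String.join ret ++ String.ofList (List.replicate x.toNat ch) := by
  fun_induction dumpA with
  | case1 x ret h ih =>
      rw [ih, join_snoc]
      have h1 : x.toNat = (getNAndNextNum x).1.toNat + (getNAndNextNum x).2.toNat := by
        simp only [getNAndNextNum]; split <;> omega
      rw [h1, List.replicate_add, String.ofList_append, String.append_assoc]
  | case2 x ret h =>
      have hx : x.toNat = 0 := by omega
      simp [hx]

lemma minChunk (x : Int) (h : 0 < x) :
    (getNAndNextNum x).1.toNat = (min 2 x).toNat ∧ (getNAndNextNum x).2 = x - min 2 x := by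
  simp only [getNAndNextNum]; constructor <;> split <;> omega

lemma loopBoth_join (flag : Bool) (a b : Int) (ret : List String) :
    (fun r => String.join (dumpA 'b' r.2.1 (dumpA 'a' r.1 r.2.2))) (loopBothA flag a b ret)
      = String.join ret ++ csSpec flag a b := by
  fun_induction loopBothA with
  | case1 a b ret h ih =>
      rw [ih, join_snoc]
      obtain ⟨e1, e2⟩ := minChunk a h.1
      conv_rhs => rw [csSpec]
      rw [if_pos h, if_pos rfl, e1, e2, String.append_assoc]
  | case2 flag a b ret h hf ih =>
      rw [ih, join_snoc]
      obtain ⟨e1, e2⟩ := minChunk b h.2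
      have hf' : flag = false := by simpa using hf
      subst hf'
      conv_rhs => rw [csSpec]
      rw [if_pos h, if_neg (by decide : ¬ (false = true)), e1, e2, String.append_assoc]
  | case3 flag a b ret h =>
      simp only
      conv_rhs => rw [csSpec]
      rw [dumpA_join, dumpA_join, if_neg h, String.append_assoc]

lemma bLoop_dump_a : ∀ (n : Nat) (a b run : Int) (out : List String), a.toNat ≤ n → b ≤ 0 →
    String.join (bLoopB a b out "a" run)
      = String.join out ++ String.ofList (List.replicate a.toNat 'a') := by
  intro n
  induction n with
  | zero =>
      intro a b run out hn hb
      rw [bLoopB, dif_neg (by omega : ¬ (0 < a ∨ 0 < b))]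
      have h0 : a.toNat = 0 := by omega
      simp [h0]
  | succ n ih =>
      intro a b run out hn hb
      by_cases ha : 0 < a
      · rw [bLoopB, dif_pos (Or.inl ha)]
        have hc : chooseC "a" run a b = "a" := by unfold chooseC; simp [hb]
        simp only [hc, reduceIte]
        rw [ih (a - 1) b (run + 1) (out ++ ["a"]) (by omega) hb, join_snoc]
        have h1 : a.toNat = 1 + (a - 1).toNat := by omega
        rw [h1, List.replicate_add, String.ofList_append, String.append_assoc,
          List.replicate_one, aStr]
      · rw [bLoopB, dif_neg (by omega : ¬ (0 < a ∨ 0 < b))]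
        have h0 : a.toNat = 0 := by omega
        simp [h0]

lemma bLoop_dump_b : ∀ (n : Nat) (a b run : Int) (out : List String), b.toNat ≤ n → a ≤ 0 →
    String.join (bLoopB a b out "b" run)
      = String.join out ++ String.ofList (List.replicate b.toNat 'b') := by
  intro n
  induction n with
  | zero =>
      intro a b run out hn ha
      rw [bLoopB, dif_neg (by omega : ¬ (0 < a ∨ 0 < b))]
      have h0 : b.toNat = 0 := by omega
      simp [h0]
  | succ n ih =>
      intro a b run out hn ha
      by_cases hb : 0 < b
      · rw [bLoopB, dif_pos (Or.inr hb)]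
        have hc : chooseC "b" run a b = "b" := by unfold chooseC; simp [ha]
        simp only [hc, reduceIte, if_neg (by decide : ¬ ("b" : String) = "a")]
        rw [ih a (b - 1) (run + 1) (out ++ ["b"]) (by omega) ha, join_snoc]
        have h1 : b.toNat = 1 + (b - 1).toNat := by omega
        rw [h1, List.replicate_add, String.ofList_append, String.append_assoc,
          List.replicate_one, bStr]
      · rw [bLoopB, dif_neg (by omega : ¬ (0 < a ∨ 0 < b))]
        have h0 : b.toNat = 0 := by omega
        simp [h0]

lemma bLoop_chunk : ∀ (n : Nat) (a b : Int) (out : List String), a.toNat + b.toNat ≤ n →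
    (0 < a → String.join (bLoopB (a - 1) b (out ++ ["a"]) "a" 1)
        = String.join out ++ csSpec true a b)
    ∧ (0 < b → String.join (bLoopB a (b - 1) (out ++ ["b"]) "b" 1)
        = String.join out ++ csSpec false a b) := by
  intro n
  induction n with
  | zero => intro a b out hn; constructor <;> intro h <;> omega
  | succ n ih =>
    intro a b out hn
    constructor
    · intro ha
      rw [bLoopB]
      by_cases hg : 0 < a - 1 ∨ 0 < b
      · rw [dif_pos hg]
        by_cases ha2 : 0 < a - 1
        · have hc : chooseC "a" 1 (a - 1) b = "a" := by
            unfold chooseC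
            rw [if_neg (by decide), if_pos rfl, if_pos (Or.inl ⟨by norm_num, ha2⟩)]
          simp only [hc, reduceIte]
          by_cases hb : 0 < b
          · rw [bLoopB, dif_pos (Or.inr hb)]
            have hc2 : chooseC "a" (1 + 1) (a - 1 - 1) b = "b" := by
              unfold chooseC
              rw [if_neg (by decide), if_pos rfl, if_neg (by omega)]
            simp only [hc2, if_neg (by decide : ¬ ("b" : String) = "a")]
            rw [(ih (a - 1 - 1) b (out ++ ["a"] ++ ["a"]) (by omega)).2 hb]
            rw [join_snoc, join_snoc]
            conv_rhs => rw [csSpec]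
            rw [if_pos ⟨ha, hb⟩, if_pos rfl]
            have hm : (min 2 a).toNat = 2 := by omega
            have hm2 : a - min 2 a = a - 1 - 1 := by omega
            rw [hm, hm2]
            rw [show String.ofList (List.replicate 2 'a') = "a" ++ "a" from by decide]
            simp [String.append_assoc]
          · rw [bLoop_dump_a (a - 1 - 1).toNat (a - 1 - 1) b (1 + 1)
              (out ++ ["a"] ++ ["a"]) le_rfl (by omega)]
            rw [join_snoc, join_snoc]
            conv_rhs => rw [csSpec]
            rw [if_neg (by omega : ¬ (0 < a ∧ 0 < b))]
            have hb0 : b.toNat = 0 := by omega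
            have h2 : a.toNat = 1 + 1 + (a - 1 - 1).toNat := by omega
            rw [hb0, h2, List.replicate_add, String.ofList_append,
              show String.ofList (List.replicate (1 + 1) 'a') = "a" ++ "a" from by decide]
            simp [String.append_assoc]
        · have hb : 0 < b := by rcases hg with h | h <;> omega
          have hc : chooseC "a" 1 (a - 1) b = "b" := by
            unfold chooseC
            rw [if_neg (by decide), if_pos rfl, if_neg (by omega)]
          simp only [hc, if_neg (by decide : ¬ ("b" : String) = "a")]
          rw [(ih (a - 1) b (out ++ ["a"]) (by omega)).2 hb]
          rw [join_snoc]
          conv_rhs => rw [csSpec]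
          rw [if_pos ⟨ha, hb⟩, if_pos rfl]
          have hm : (min 2 a).toNat = 1 := by omega
          have hm2 : a - min 2 a = a - 1 := by omega
          rw [hm, hm2, List.replicate_one]
          simp [aStr, String.append_assoc]
      · rw [dif_neg hg, join_snoc]
        conv_rhs => rw [csSpec]
        rw [if_neg (by omega : ¬ (0 < a ∧ 0 < b))]
        have h1 : a.toNat = 1 := by omega
        have hb0 : b.toNat = 0 := by omega
        rw [h1, hb0, List.replicate_one]
        simp [aStr]
    · intro hb
      rw [bLoopB]
      by_cases hg : 0 < a ∨ 0 < b - 1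
      · rw [dif_pos hg]
        by_cases hb2 : 0 < b - 1
        · have hc : chooseC "b" 1 a (b - 1) = "b" := by
            unfold chooseC
            rw [if_neg (by decide), if_neg (by decide), if_pos (Or.inl ⟨by norm_num, hb2⟩)]
          simp only [hc, reduceIte, if_neg (by decide : ¬ ("b" : String) = "a")]
          by_cases ha : 0 < a
          · rw [bLoopB, dif_pos (Or.inl ha)]
            have hc2 : chooseC "b" (1 + 1) a (b - 1 - 1) = "a" := by
              unfold chooseC
              rw [if_neg (by decide), if_neg (by decide), if_neg (by omega)]
            simp only [hc2, reduceIte, if_neg (by decide : ¬ ("a" : String) = "b")]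
            rw [(ih a (b - 1 - 1) (out ++ ["b"] ++ ["b"]) (by omega)).1 ha]
            rw [join_snoc, join_snoc]
            conv_rhs => rw [csSpec]
            rw [if_pos ⟨ha, hb⟩, if_neg (by decide : ¬ (false = true))]
            have hm : (min 2 b).toNat = 2 := by omega
            have hm2 : b - min 2 b = b - 1 - 1 := by omega
            rw [hm, hm2]
            rw [show String.ofList (List.replicate 2 'b') = "b" ++ "b" from by decide]
            simp [String.append_assoc]
          · rw [bLoop_dump_b (b - 1 - 1).toNat a (b - 1 - 1) (1 + 1)
              (out ++ ["b"] ++ ["b"]) le_rfl (by omega)]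
            rw [join_snoc, join_snoc]
            conv_rhs => rw [csSpec]
            rw [if_neg (by omega : ¬ (0 < a ∧ 0 < b))]
            have ha0 : a.toNat = 0 := by omega
            have h2 : b.toNat = 1 + 1 + (b - 1 - 1).toNat := by omega
            rw [ha0, h2, List.replicate_add, String.ofList_append,
              show String.ofList (List.replicate (1 + 1) 'b') = "b" ++ "b" from by decide]
            simp [String.append_assoc]
        · have ha : 0 < a := by rcases hg with h | h <;> omega
          have hc : chooseC "b" 1 a (b - 1) = "a" := by
            unfold chooseC
            rw [if_neg (by decide), if_neg (by decide), if_neg (by omega)]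
          simp only [hc, reduceIte, if_neg (by decide : ¬ ("a" : String) = "b")]
          rw [(ih a (b - 1) (out ++ ["b"]) (by omega)).1 ha]
          rw [join_snoc]
          conv_rhs => rw [csSpec]
          rw [if_pos ⟨ha, hb⟩, if_neg (by decide : ¬ (false = true))]
          have hm : (min 2 b).toNat = 1 := by omega
          have hm2 : b - min 2 b = b - 1 := by omega
          rw [hm, hm2, List.replicate_one]
          simp [bStr, String.append_assoc]
      · rw [dif_neg hg, join_snoc]
        conv_rhs => rw [csSpec]
        rw [if_neg (by omega : ¬ (0 < a ∧ 0 < b))]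
        have h1 : b.toNat = 1 := by omega
        have ha0 : a.toNat = 0 := by omega
        rw [h1, ha0, List.replicate_one]
        simp [bStr]

lemma altSide (A B : Int) : strWithout3a3b0_alt A B = csSpec (if A < B then false else true) A B := by
  unfold strWithout3a3b0_alt
  rw [bLoopB]
  by_cases hg : 0 < A ∨ 0 < B
  · rw [dif_pos hg]
    have hc : chooseC "" 0 A B = (if B ≤ A then "a" else "b") := by
      unfold chooseC; rw [if_pos rfl]
    by_cases hab : B ≤ A
    · have ha : 0 < A := by omega
      have hc' : chooseC "" 0 A B = "a" := by rw [hc, if_pos hab]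
      simp only [hc', reduceIte, if_neg (by decide : ¬ ("a" : String) = "")]
      rw [(bLoop_chunk (A.toNat + B.toNat) A B [] le_rfl).1 ha]
      rw [show (if A < B then false else true) = true from by rw [if_neg (by omega)]]
      simp [join_nil]
    · have hb : 0 < B := by omega
      have hc' : chooseC "" 0 A B = "b" := by rw [hc, if_neg hab]
      simp only [hc', if_neg (by decide : ¬ ("b" : String) = ""),
        if_neg (by decide : ¬ ("b" : String) = "a")]
      rw [(bLoop_chunk (A.toNat + B.toNat) A B [] le_rfl).2 hb]
      rw [show (if A < B then false else true) = false from by rw [if_pos (by omega)]]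
      simp [join_nil]
  · rw [dif_neg hg]
    conv_rhs => rw [csSpec]
    rw [if_neg (by omega : ¬ (0 < A ∧ 0 < B))]
    simp [join_nil, show A.toNat = 0 from by omega, show B.toNat = 0 from by omega]

lemma aSide (A B : Int) : strWithout3a3b0 A B = csSpec (if A < B then false else true) A B := by
  have h := loopBoth_join (if A < B then false else true) A B []
  simp only at h
  simpa [strWithout3a3b0] using h

-- ===== VERDICT (by name: the statement is the Claim_ definition above) =====
theorem strWithout3a3b0_spec : Claim_equal_strWithout3a3b0 := by
  intro A B _
  unfold Spec_strWithout3a3b0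
  rw [aSide, altSide]
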